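-- pv_equiv track=rewrite | github.com/security-force-monitor/sfm-graph-extractor | NER_v2/ne_def.py | correct_position
-- ===== SOURCE A (Python) =====
-- def correct_position(whole_str, query_idx, query_str):
--     offset = 0
--     left_idx = query_idx - offset
--     right_idx = query_idx + offset
--     while left_idx >= 0 or right_idx < len(whole_str):
--         left_idx = query_idx - offset
--         if left_idx >= 0 and whole_str[left_idx: left_idx + len(query_str)] == query_str:
--             return (left_idx, left_idx + len(query_str))
--
--         right_idx = query_idx + offset
--         if right_idx < len(whole_str) and whole_str[right_idx: right_idx + len(query_str)] == query_str:
--             return (right_idx, right_idx + len(query_str))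
--
--         offset += 1
--
--     return None, None
-- ===== SOURCE B (Python) =====
-- def correct_position(whole_str, query_idx, query_str):
--     m = len(query_str)
--     best = None
--     for p in range(len(whole_str) - m + 1):
--         if whole_str[p:p + m] == query_str and (best is None or abs(p - query_idx) < abs(best - query_idx)):
--             best = p
--     if best is None:
--         return (None, None)
--     return (best, best + m)
-- ===== Notes on version B (the rewrite author's own statement) =====
-- stated objective: simpler
-- what changed: Replaces A's expanding two-sided spiral search (slicing at query_idx-offset / query_idx+offset with early return, which also wraps around via Python negative slicing) by a single left-to-right scan over all candidate positions that keeps the running nearest-to-query_idx match (strict improvement keeps the leftmost on ties).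
-- intended difference: When query_idx < 0 and query_str occurs at a position j with j >= len(whole_str)+query_idx and j+len(query_str) < len(whole_str), Python's negative-slice wraparound makes A return negative indices pointing at that end-of-string occurrence (e.g. (-2,-1)); B returns the true nearest occurrence with nonnegative indices, which is the intended result. — e.g. on correct_position("abc", -3, "b"): A returns (some (-2), some (-1)), B returns (some 1, some 2)
-- outside the precondition, e.g. on correct_position('ab', 5, ''): A returns (5, 5), B returns (2, 2)
import Mathlib
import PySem

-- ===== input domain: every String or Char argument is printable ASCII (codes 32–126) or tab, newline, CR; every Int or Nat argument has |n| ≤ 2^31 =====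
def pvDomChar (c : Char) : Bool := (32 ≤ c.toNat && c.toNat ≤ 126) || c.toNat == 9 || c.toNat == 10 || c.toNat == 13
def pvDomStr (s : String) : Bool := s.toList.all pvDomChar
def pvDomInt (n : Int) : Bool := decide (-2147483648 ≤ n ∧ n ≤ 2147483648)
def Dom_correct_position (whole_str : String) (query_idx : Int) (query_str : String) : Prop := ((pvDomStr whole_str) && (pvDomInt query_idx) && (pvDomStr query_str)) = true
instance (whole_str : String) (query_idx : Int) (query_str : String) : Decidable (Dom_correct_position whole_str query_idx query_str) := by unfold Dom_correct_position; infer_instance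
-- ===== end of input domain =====

-- B replaces A's expanding two-sided spiral search by one left-to-right scan keeping the
-- running nearest match (objective: simpler); on query_idx < 0 with a late occurrence A's
-- negative-slice wraparound returns negative indices — B returns the real occurrence (see D_).


-- ===== PORT A =====
-- literal transliteration of A's while-loop; `fuel` is only a totality guard: it bounds the
-- number of iterations, and the loop provably exits before fuel runs out (both branches that
-- consume the last unit of fuel return the loop's own fall-through value (none, none))
def aLoop (whole_str : String) (query_idx : Int) (query_str : String) :
    Int → Int → Int → Nat → Option Int × Option Int
  | _, _, _, 0 => (none, none)
  | offset, left_idx, right_idx, fuel+1 =>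
    if 0 ≤ left_idx ∨ right_idx < PySem.Str.len whole_str then
      if 0 ≤ query_idx - offset ∧
          PySem.Str.slice whole_str (some (query_idx - offset)) (some (query_idx - offset + PySem.Str.len query_str)) = query_str then
        (some (query_idx - offset), some (query_idx - offset + PySem.Str.len query_str))
      else if query_idx + offset < PySem.Str.len whole_str ∧
          PySem.Str.slice whole_str (some (query_idx + offset)) (some (query_idx + offset + PySem.Str.len query_str)) = query_str then
        (some (query_idx + offset), some (query_idx + offset + PySem.Str.len query_str))
      else
        aLoop whole_str query_idx query_str (offset+1) (query_idx - offset) (query_idx + offset) fuel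
    else (none, none)

def correct_position (whole_str : String) (query_idx : Int) (query_str : String) : Option Int × Option Int :=
  aLoop whole_str query_idx query_str 0 query_idx query_idx
    (max (query_idx + 2) (PySem.Str.len whole_str - query_idx + 1)).toNat

-- ===== PORT B =====
-- loop body of Source B; the 'best is None or …' disjunction is split on best to keep the test decidable
def bStep (whole_str : String) (query_idx : Int) (query_str : String) (best : Option Int) (p : Int) : Option Int :=
  match best with
  | none =>
      if PySem.Str.slice whole_str (some p) (some (p + PySem.Str.len query_str)) = query_str then some p
      else none
  | some b =>
      if PySem.Str.slice whole_str (some p) (some (p + PySem.Str.len query_str)) = query_str ∧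
          |p - query_idx| < |b - query_idx| then some p
      else some b

def correct_position_alt (whole_str : String) (query_idx : Int) (query_str : String) : Option Int × Option Int :=
  let m := PySem.Str.len query_str
  let best := (PySem.List.pyRange 0 (PySem.Str.len whole_str - m + 1) 1).foldl
    (bStep whole_str query_idx query_str) none
  match best with
  | none => (none, none)
  | some b => (some b, some (b + m))

-- ===== PRECONDITION & SPEC =====
-- Pre_ excludes only the empty query string, for which every position "matches" and both answers
-- are accidental: A returns (query_idx, query_idx) even when query_idx is out of range, B the
-- nearest in-range position (e.g. on ("ab", 5, "") A returns (5, 5), B returns (2, 2)).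
def Pre_correct_position (whole_str : String) (query_idx : Int) (query_str : String) : Prop :=
  query_str ≠ ""
instance (whole_str : String) (query_idx : Int) (query_str : String) : Decidable (Pre_correct_position whole_str query_idx query_str) := by unfold Pre_correct_position; infer_instance
def pvWitness_correct_position : String × Int × String := ("abc", 1, "b")

-- When query_idx < 0 and query_str occurs at a position j ≥ len(whole_str)+query_idx with
-- j+len(query_str) < len(whole_str), Python's negative-slice wraparound makes A return negative
-- indices pointing at that end-of-string occurrence; B returns the true nearest occurrence with
-- nonnegative indices, which is the intended result.
def D_correct_position (whole_str : String) (query_idx : Int) (query_str : String) : Prop :=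
  query_str ≠ "" ∧ query_idx < 0 ∧
    ∃ j ∈ List.range whole_str.toList.length,
      (whole_str.toList.length : Int) + query_idx ≤ (j : Int) ∧
      j + query_str.toList.length + 1 ≤ whole_str.toList.length ∧
      (whole_str.toList.drop j).take query_str.toList.length = query_str.toList
instance (whole_str : String) (query_idx : Int) (query_str : String) : Decidable (D_correct_position whole_str query_idx query_str) := by unfold D_correct_position; infer_instance

def Spec_correct_position (whole_str : String) (query_idx : Int) (query_str : String) (out : Option Int × Option Int) : Prop := ¬ D_correct_position whole_str query_idx query_str → out = correct_position_alt whole_str query_idx query_str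
instance (whole_str : String) (query_idx : Int) (query_str : String) (out : Option Int × Option Int) : Decidable (Spec_correct_position whole_str query_idx query_str out) := by unfold Spec_correct_position; infer_instance

def pvDiffWitness_correct_position : String × Int × String := ("abc", -3, "b")
def pvDiffWitnessOut_correct_position : (Option Int × Option Int) × (Option Int × Option Int) :=
  ((some (-2), some (-1)), (some 1, some 2))

-- ===== CLAIM (what is proved, stated in full; the proofs are below) =====
def Claim_unchanged_correct_position : Prop := ∀ (whole_str : String) (query_idx : Int) (query_str : String), Dom_correct_position whole_str query_idx query_str → Pre_correct_position whole_str query_idx query_str → Spec_correct_position whole_str query_idx query_str (correct_position whole_str query_idx query_str)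
def Claim_changed_correct_position : Prop := Dom_correct_position (pvDiffWitness_correct_position.1) (pvDiffWitness_correct_position.2.1) (pvDiffWitness_correct_position.2.2) ∧ Pre_correct_position (pvDiffWitness_correct_position.1) (pvDiffWitness_correct_position.2.1) (pvDiffWitness_correct_position.2.2) ∧ D_correct_position (pvDiffWitness_correct_position.1) (pvDiffWitness_correct_position.2.1) (pvDiffWitness_correct_position.2.2) ∧ correct_position (pvDiffWitness_correct_position.1) (pvDiffWitness_correct_position.2.1) (pvDiffWitness_correct_position.2.2) = pvDiffWitnessOut_correct_position.1 ∧ correct_position_alt (pvDiffWitness_correct_position.1) (pvDiffWitness_correct_position.2.1) (pvDiffWitness_correct_position.2.2) = pvDiffWitnessOut_correct_position.2 ∧ pvDiffWitnessOut_correct_position.1 ≠ pvDiffWitnessOut_correct_position.2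
def Claim_exact_correct_position : Prop := ∀ (whole_str : String) (query_idx : Int) (query_str : String), Dom_correct_position whole_str query_idx query_str → Pre_correct_position whole_str query_idx query_str → D_correct_position whole_str query_idx query_str → correct_position whole_str query_idx query_str ≠ correct_position_alt whole_str query_idx query_str

-- ===== LEMMAS AND PROOFS =====

-- the slice test both programs perform at (possibly negative) position p
abbrev chkS (w q : String) (p : Int) : Prop :=
  PySem.Str.slice w (some p) (some (p + (q.toList.length : Int))) = q

-- a real occurrence of q in w at in-range position j
def occN (w q : String) (j : Nat) : Prop :=
  j + q.toList.length ≤ w.toList.length ∧ (w.toList.drop j).take q.toList.length = q.toList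

lemma chk_list (w q : String) (p : Int) :
    chkS w q p ↔ PySem.List.slice w.toList (some p) (some (p + (q.toList.length : Int))) = q.toList := by
  unfold chkS PySem.Str.slice
  rw [PySem.Chars.slice_eq_listSlice]
  constructor
  · intro h
    have h' := congrArg String.toList h
    rwa [String.toList_ofList] at h'
  · intro h
    rw [h, String.ofList_toList]

lemma clampIdx_eq (n : Nat) (i : Int) :
    (PySem.List.clampIdx n i : Int) = max 0 (min (n : Int) (if i < 0 then (n : Int) + i else i)) := by
  simp only [PySem.List.clampIdx]
  split_ifs <;> omega

lemma slice_drop_take (W : List Char) (a b : Int) :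
    PySem.List.slice W (some a) (some b) =
      (W.drop (PySem.List.clampIdx W.length a)).take
        (PySem.List.clampIdx W.length b - PySem.List.clampIdx W.length a) := by
  simp [PySem.List.slice]

lemma chk_nonneg (w q : String) (p : Int) (hm : 0 < q.toList.length) (hp : 0 ≤ p) :
    chkS w q p ↔ occN w q p.toNat := by
  rw [chk_list, slice_drop_take]
  have hca := clampIdx_eq w.toList.length p
  rw [if_neg (by omega)] at hca
  have hcb := clampIdx_eq w.toList.length (p + (q.toList.length : Int))
  rw [if_neg (by omega)] at hcb
  by_cases hfit : p.toNat + q.toList.length ≤ w.toList.length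
  · have ha : PySem.List.clampIdx w.toList.length p = p.toNat := by omega
    have hb : PySem.List.clampIdx w.toList.length (p + (q.toList.length : Int)) =
        p.toNat + q.toList.length := by omega
    rw [ha, hb]
    have hsub : p.toNat + q.toList.length - p.toNat = q.toList.length := by omega
    rw [hsub]
    unfold occN
    constructor
    · intro h; exact ⟨hfit, h⟩
    · rintro ⟨-, h⟩; exact h
  · constructor
    · intro h
      have hL := congrArg List.length h
      rw [List.length_take, List.length_drop] at hL
      omega
    · rintro ⟨hb, -⟩; exact absurd hb hfit

lemma chk_wrap (w q : String) (p : Int) (hm : 0 < q.toList.length) (hp : p < 0)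
    (h2 : p + q.toList.length < 0) (h3 : 0 ≤ (w.toList.length : Int) + p) :
    chkS w q p ↔ occN w q ((w.toList.length : Int) + p).toNat := by
  rw [chk_list, slice_drop_take]
  have hca := clampIdx_eq w.toList.length p
  rw [if_pos hp] at hca
  have hcb := clampIdx_eq w.toList.length (p + (q.toList.length : Int))
  rw [if_pos (by omega)] at hcb
  have ha : PySem.List.clampIdx w.toList.length p = ((w.toList.length : Int) + p).toNat := by omega
  have hb : PySem.List.clampIdx w.toList.length (p + (q.toList.length : Int)) =
      ((w.toList.length : Int) + p).toNat + q.toList.length := by omega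
  rw [ha, hb]
  have hsub : ((w.toList.length : Int) + p).toNat + q.toList.length -
      ((w.toList.length : Int) + p).toNat = q.toList.length := by omega
  rw [hsub]
  unfold occN
  constructor
  · intro h; exact ⟨by omega, h⟩
  · rintro ⟨-, h⟩; exact h

lemma chk_neg_false (w q : String) (p : Int) (hm : 0 < q.toList.length) (hp : p < 0)
    (h : ¬ (p + q.toList.length < 0 ∧ 0 ≤ (w.toList.length : Int) + p)) :
    ¬ chkS w q p := by
  rw [chk_list, slice_drop_take]
  intro hEq
  have hL := congrArg List.length hEq
  rw [List.length_take, List.length_drop] at hL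
  have hca := clampIdx_eq w.toList.length p
  rw [if_pos hp] at hca
  have hcb := clampIdx_eq w.toList.length (p + (q.toList.length : Int))
  by_cases h2 : p + (q.toList.length : Int) < 0
  · rw [if_pos h2] at hcb
    omega
  · rw [if_neg h2] at hcb
    omega

lemma chk_nat (w q : String) (j : Nat) (hm : 0 < q.toList.length) :
    chkS w q (j : Int) ↔ occN w q j := by
  rw [chk_nonneg w q (j : Int) hm (Int.natCast_nonneg j), Int.toNat_natCast]

-- B's fold, abstracted over the (integer) upper bound of the scanned range
def bFold (w : String) (qi : Int) (q : String) (bound : Int) : Option Int :=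
  (PySem.List.pyRange 0 bound 1).foldl (bStep w qi q) none

lemma alt_eq (w : String) (qi : Int) (q : String) :
    correct_position_alt w qi q =
      (match bFold w qi q (PySem.Str.len w - PySem.Str.len q + 1) with
       | none => (none, none)
       | some b => (some b, some (b + PySem.Str.len q))) := rfl

lemma bStep_none (w : String) (qi : Int) (q : String) (p : Int) :
    bStep w qi q none p = if chkS w q p then some p else none := by
  simp only [bStep, chkS, PySem.Str.len_eq]
  split_ifs <;> rfl

lemma bStep_some (w : String) (qi : Int) (q : String) (b p : Int) :
    bStep w qi q (some b) p = if chkS w q p ∧ |p - qi| < |b - qi| then some p else some b := by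
  simp only [bStep, chkS, PySem.Str.len_eq]
  split_ifs <;> rfl

lemma bFold_spec (w : String) (qi : Int) (q : String) (K : Nat) :
    (bFold w qi q (K : Int) = none ∧ ∀ j : Nat, j < K → ¬ chkS w q j) ∨
    (∃ b : Nat, bFold w qi q (K : Int) = some (b : Int) ∧ b < K ∧ chkS w q b ∧
      (∀ j : Nat, j < K → chkS w q j → |(b : Int) - qi| ≤ |(j : Int) - qi|) ∧
      (∀ j : Nat, j < K → chkS w q j → |(j : Int) - qi| = |(b : Int) - qi| → b ≤ j)) := by
  induction K with
  | zero =>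
    left
    constructor
    · unfold bFold
      rw [PySem.List.pyRange_one_eq_nil (by simp), List.foldl_nil]
    · intro j hj
      exact absurd hj (Nat.not_lt_zero j)
  | succ K IH =>
    have hK1 : ((K + 1 : Nat) : Int) = (K : Int) + 1 := by push_cast; ring
    have hsplit : PySem.List.pyRange 0 ((K + 1 : Nat) : Int) 1 =
        PySem.List.pyRange 0 (K : Int) 1 ++ [(K : Int)] := by
      rw [hK1]
      exact PySem.List.pyRange_one_succ_right (Int.natCast_nonneg K)
    unfold bFold
    rw [hsplit, List.foldl_append, List.foldl_cons, List.foldl_nil]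
    unfold bFold at IH
    rcases IH with ⟨hnone, hall⟩ | ⟨b, hsome, hbK, hcb, hmin, htie⟩
    · rw [hnone, bStep_none]
      by_cases hcK : chkS w q (K : Int)
      · rw [if_pos hcK]
        right
        refine ⟨K, rfl, Nat.lt_succ_self K, hcK, ?_, ?_⟩
        · intro j hj hc
          rcases Nat.lt_succ_iff_lt_or_eq.mp hj with hj' | hj'
          · exact absurd hc (hall j hj')
          · subst hj'; exact le_rfl
        · intro j hj hc _
          rcases Nat.lt_succ_iff_lt_or_eq.mp hj with hj' | hj'
          · exact absurd hc (hall j hj')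
          · omega
      · rw [if_neg hcK]
        left
        refine ⟨rfl, ?_⟩
        intro j hj
        rcases Nat.lt_succ_iff_lt_or_eq.mp hj with hj' | hj'
        · exact hall j hj'
        · subst hj'; exact hcK
    · rw [hsome, bStep_some]
      by_cases hupd : chkS w q (K : Int) ∧ |(K : Int) - qi| < |(b : Int) - qi|
      · rw [if_pos hupd]
        right
        refine ⟨K, rfl, Nat.lt_succ_self K, hupd.1, ?_, ?_⟩
        · intro j hj hc
          rcases Nat.lt_succ_iff_lt_or_eq.mp hj with hj' | hj'
          · exact le_of_lt (lt_of_lt_of_le hupd.2 (hmin j hj' hc))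
          · subst hj'; exact le_rfl
        · intro j hj hc heq
          rcases Nat.lt_succ_iff_lt_or_eq.mp hj with hj' | hj'
          · exact absurd heq (by have := hmin j hj' hc; have := hupd.2; omega)
          · omega
      · rw [if_neg hupd]
        right
        refine ⟨b, rfl, Nat.lt_succ_of_lt hbK, hcb, ?_, ?_⟩
        · intro j hj hc
          rcases Nat.lt_succ_iff_lt_or_eq.mp hj with hj' | hj'
          · exact hmin j hj' hc
          · subst hj'
            by_contra hlt
            exact hupd ⟨hc, by omega⟩
        · intro j hj hc heq
          rcases Nat.lt_succ_iff_lt_or_eq.mp hj with hj' | hj'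
          · exact htie j hj' hc heq
          · omega

lemma alt_none (w : String) (qi : Int) (q : String) (hm : 0 < q.toList.length)
    (h : ∀ j : Nat, ¬ occN w q j) : correct_position_alt w qi q = (none, none) := by
  rw [alt_eq]
  by_cases hfit : q.toList.length ≤ w.toList.length
  · have hKeq : PySem.Str.len w - PySem.Str.len q + 1 =
        ((w.toList.length - q.toList.length + 1 : Nat) : Int) := by
      simp only [PySem.Str.len_eq]; omega
    rw [hKeq]
    rcases bFold_spec w qi q (w.toList.length - q.toList.length + 1) with ⟨hn, -⟩ | ⟨b, hsome, hbK, hcb, -, -⟩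
    · rw [hn]
    · exact absurd ((chk_nat w q b hm).mp hcb) (h b)
  · have hle : PySem.Str.len w - PySem.Str.len q + 1 ≤ 0 := by
      simp only [PySem.Str.len_eq]; omega
    have hnil : bFold w qi q (PySem.Str.len w - PySem.Str.len q + 1) = none := by
      unfold bFold
      rw [PySem.List.pyRange_one_eq_nil hle, List.foldl_nil]
    rw [hnil]

lemma alt_best (w : String) (qi : Int) (q : String) (hm : 0 < q.toList.length) (b : Nat)
    (hb : occN w q b)
    (hmin : ∀ j : Nat, occN w q j → |(b : Int) - qi| ≤ |(j : Int) - qi|)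
    (htie : ∀ j : Nat, occN w q j → |(j : Int) - qi| = |(b : Int) - qi| → b ≤ j) :
    correct_position_alt w qi q = (some (b : Int), some ((b : Int) + (q.toList.length : Int))) := by
  have hfit : b + q.toList.length ≤ w.toList.length := hb.1
  rw [alt_eq]
  have hKeq : PySem.Str.len w - PySem.Str.len q + 1 =
      ((w.toList.length - q.toList.length + 1 : Nat) : Int) := by
    simp only [PySem.Str.len_eq]; omega
  rw [hKeq]
  rcases bFold_spec w qi q (w.toList.length - q.toList.length + 1) with ⟨hn, hnone⟩ | ⟨b', hsome, hb'K, hcb', hmin', htie'⟩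
  · exact absurd ((chk_nat w q b hm).mpr hb) (hnone b (by omega))
  · rw [hsome]
    have hocc' : occN w q b' := (chk_nat w q b' hm).mp hcb'
    have h1 : |(b : Int) - qi| ≤ |(b' : Int) - qi| := hmin b' hocc'
    have h2 : |(b' : Int) - qi| ≤ |(b : Int) - qi| :=
      hmin' b (by omega) ((chk_nat w q b hm).mpr hb)
    have heq : |(b' : Int) - qi| = |(b : Int) - qi| := le_antisymm h2 h1
    have h3 : b' ≤ b := htie' b (by omega) ((chk_nat w q b hm).mpr hb) heq.symm
    have h4 : b ≤ b' := htie b' hocc' heq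
    have : b' = b := le_antisymm h3 h4
    subst this
    rfl

lemma occ_dist_ge (w q : String) (qi offset : Int) (hm : 0 < q.toList.length)
    (hinv : ∀ d : Int, 0 ≤ d → d < offset →
      (0 ≤ qi - d → ¬ chkS w q (qi - d)) ∧ (qi + d < (w.toList.length : Int) → ¬ chkS w q (qi + d)))
    (j : Nat) (hj : occN w q j) : offset ≤ |(j : Int) - qi| := by
  by_contra hlt
  push_neg at hlt
  have hchkj : chkS w q (j : Int) := (chk_nat w q j hm).mpr hj
  obtain ⟨hjb, -⟩ := hj
  rcases abs_cases ((j : Int) - qi) with ⟨he, hsign⟩ | ⟨he, hsign⟩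
  · have hd := (hinv ((j : Int) - qi) (by omega) (by omega)).2
    have hrw : qi + ((j : Int) - qi) = (j : Int) := by ring
    rw [hrw] at hd
    exact hd (by omega) hchkj
  · have hd := (hinv (qi - (j : Int)) (by omega) (by omega)).1
    have hrw : qi - (qi - (j : Int)) = (j : Int) := by ring
    rw [hrw] at hd
    exact hd (by omega) hchkj

lemma no_occ_exhausted (w q : String) (qi offset : Int) (hm : 0 < q.toList.length)
    (hinv : ∀ d : Int, 0 ≤ d → d < offset →
      (0 ≤ qi - d → ¬ chkS w q (qi - d)) ∧ (qi + d < (w.toList.length : Int) → ¬ chkS w q (qi + d)))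
    (hA : qi + 2 ≤ offset) (hB : (w.toList.length : Int) - qi + 1 ≤ offset) :
    ∀ j : Nat, ¬ occN w q j := by
  intro j hj
  have hge := occ_dist_ge w q qi offset hm hinv j hj
  obtain ⟨hjb, -⟩ := hj
  rcases abs_cases ((j : Int) - qi) with ⟨he, -⟩ | ⟨he, -⟩ <;> omega

lemma aLoop_eq (w : String) (qi : Int) (q : String) (hm : 0 < q.toList.length)
    (hD : ¬ D_correct_position w qi q) :
    ∀ (fuel : Nat) (offset left_idx right_idx : Int), 0 ≤ offset →
      ((offset = 0 ∧ left_idx = qi ∧ right_idx = qi) ∨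
        (1 ≤ offset ∧ left_idx = qi - offset + 1 ∧ right_idx = qi + offset - 1)) →
      (∀ d : Int, 0 ≤ d → d < offset →
        (0 ≤ qi - d → ¬ chkS w q (qi - d)) ∧ (qi + d < (w.toList.length : Int) → ¬ chkS w q (qi + d))) →
      max (qi + 2) ((w.toList.length : Int) - qi + 1) - offset ≤ (fuel : Int) →
      aLoop w qi q offset left_idx right_idx fuel = correct_position_alt w qi q := by
  intro fuel
  induction fuel with
  | zero =>
    intro offset l r h0 hrel hinv hfuel
    rw [show aLoop w qi q offset l r 0 = (none, none) from rfl]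
    exact (alt_none w qi q hm
      (no_occ_exhausted w q qi offset hm hinv (by omega) (by omega))).symm
  | succ f IH =>
    intro offset l r h0 hrel hinv hfuel
    simp only [aLoop, PySem.Str.len_eq]
    split_ifs with hcond h1 h2
    · -- left side fires at qi - offset
      have hocc : occN w q (qi - offset).toNat := (chk_nonneg w q (qi - offset) hm h1.1).mp h1.2
      have e : (((qi - offset).toNat : Nat) : Int) = qi - offset := Int.toNat_of_nonneg h1.1
      have hbd : |(((qi - offset).toNat : Nat) : Int) - qi| = offset := by
        rw [e]
        have : qi - offset - qi = -offset := by ring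
        rw [this, abs_neg, abs_of_nonneg h0]
      have hmin : ∀ j : Nat, occN w q j → |(((qi - offset).toNat : Nat) : Int) - qi| ≤ |(j : Int) - qi| := by
        intro j hj
        rw [hbd]
        exact occ_dist_ge w q qi offset hm hinv j hj
      have htie : ∀ j : Nat, occN w q j → |(j : Int) - qi| = |(((qi - offset).toNat : Nat) : Int) - qi| →
          (qi - offset).toNat ≤ j := by
        intro j hj heq
        rw [hbd] at heq
        rcases abs_cases ((j : Int) - qi) with ⟨he, -⟩ | ⟨he, -⟩ <;> omega
      rw [alt_best w qi q hm (qi - offset).toNat hocc hmin htie, e]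
    · -- right side fires at qi + offset
      by_cases hneg : qi + offset < 0
      · -- a wrapped (negative-index) match: exactly the D_ region — contradiction with ¬D_
        exfalso
        apply hD
        have hchk : chkS w q (qi + offset) := h2.2
        have hcase : (qi + offset) + (q.toList.length : Int) < 0 ∧
            0 ≤ (w.toList.length : Int) + (qi + offset) := by
          by_contra hc
          exact chk_neg_false w q (qi + offset) hm hneg hc hchk
        have hocc : occN w q ((w.toList.length : Int) + (qi + offset)).toNat :=
          (chk_wrap w q (qi + offset) hm hneg hcase.1 hcase.2).mp hchk
        refine ⟨?_, by omega, ((w.toList.length : Int) + (qi + offset)).toNat, ?_, ?_, ?_, hocc.2⟩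
        · intro hq0
          rw [hq0] at hm
          simp at hm
        · exact List.mem_range.mpr (by omega)
        · omega
        · have := hocc.1
          omega
      · -- a genuine match at qi + offset ≥ 0
        push_neg at hneg
        have hocc : occN w q (qi + offset).toNat := (chk_nonneg w q (qi + offset) hm hneg).mp h2.2
        have e : (((qi + offset).toNat : Nat) : Int) = qi + offset := Int.toNat_of_nonneg hneg
        have hbd : |(((qi + offset).toNat : Nat) : Int) - qi| = offset := by
          rw [e]
          have : qi + offset - qi = offset := by ring
          rw [this, abs_of_nonneg h0]
        have hmin : ∀ j : Nat, occN w q j → |(((qi + offset).toNat : Nat) : Int) - qi| ≤ |(j : Int) - qi| := by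
          intro j hj
          rw [hbd]
          exact occ_dist_ge w q qi offset hm hinv j hj
        have htie : ∀ j : Nat, occN w q j → |(j : Int) - qi| = |(((qi + offset).toNat : Nat) : Int) - qi| →
            (qi + offset).toNat ≤ j := by
          intro j hj heq
          rw [hbd] at heq
          rcases abs_cases ((j : Int) - qi) with ⟨he, -⟩ | ⟨he, -⟩
          · omega
          · -- j = qi - offset would have fired on the left first
            exfalso
            have hj' : (j : Int) = qi - offset := by omega
            have hchkj : chkS w q (qi - offset) := by
              rw [← hj']
              exact (chk_nat w q j hm).mpr hj
            exact h1 ⟨by omega, hchkj⟩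
        rw [alt_best w qi q hm (qi + offset).toNat hocc hmin htie, e]
    · -- neither side fires: continue with offset + 1
      apply IH (offset + 1) (qi - offset) (qi + offset) (by omega)
        (Or.inr ⟨by omega, by ring_nf, by ring_nf⟩)
      · intro d hd0 hdlt
        by_cases hdo : d < offset
        · exact hinv d hd0 hdo
        · have hdeq : d = offset := by omega
          subst hdeq
          constructor
          · intro hge hchk
            exact h1 ⟨hge, hchk⟩
          · intro hlt hchk
            exact h2 ⟨hlt, hchk⟩
      · omega
    · -- loop condition false: scanned past both ends, no match anywhere
      rcases hrel with ⟨ho, hl, hr⟩ | ⟨ho, hl, hr⟩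
      · exfalso
        push_neg at hcond
        omega
      · push_neg at hcond
        exact (alt_none w qi q hm
          (no_occ_exhausted w q qi offset hm hinv (by omega) (by omega))).symm

lemma aLoop_wrapfire (w : String) (qi : Int) (q : String) (p0 : Int)
    (hchk : chkS w q p0) (hp0 : p0 < 0) :
    ∀ (fuel : Nat) (offset left_idx right_idx : Int), 0 ≤ offset → qi + offset ≤ p0 →
      right_idx < (w.toList.length : Int) →
      p0 - qi + 1 - offset ≤ (fuel : Int) →
      ∃ r : Int, r < 0 ∧
        aLoop w qi q offset left_idx right_idx fuel = (some r, some (r + PySem.Str.len q)) := by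
  intro fuel
  induction fuel with
  | zero =>
    intro offset l r h0 hle hr hfuel
    exact absurd hfuel (by omega)
  | succ f IH =>
    intro offset l r h0 hle hr hfuel
    simp only [aLoop, PySem.Str.len_eq]
    rw [if_pos (Or.inr hr)]
    split_ifs with h1 h2
    · exfalso
      omega
    · exact ⟨qi + offset, by omega, rfl⟩
    · by_cases hp : qi + offset = p0
      · exfalso
        apply h2
        rw [hp]
        exact ⟨by omega, hchk⟩
      · obtain ⟨rr, hrr, hres⟩ := IH (offset + 1) (qi - offset) (qi + offset)
          (by omega) (by omega) (by omega) (by omega)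
        exact ⟨rr, hrr, hres⟩

-- ===== VERDICT (by name: the statement is the Claim_ definition above) =====
theorem correct_position_spec : Claim_unchanged_correct_position := by
  intro w qi q _ hPre
  unfold Spec_correct_position
  intro hD
  have hm : 0 < q.toList.length := by
    rcases Nat.eq_zero_or_pos q.toList.length with h | h
    · exact absurd (by simpa [String.toList_eq_nil_iff] using List.length_eq_zero_iff.mp h) hPre
    · exact h
  unfold correct_position
  rw [PySem.Str.len_eq]
  refine aLoop_eq w qi q hm hD _ 0 qi qi le_rfl (Or.inl ⟨rfl, rfl, rfl⟩) ?_ ?_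
  · intro d h1 h2
    exact absurd h2 (by omega)
  · omega

theorem correct_position_changed : Claim_changed_correct_position := by
  unfold Claim_changed_correct_position
  decide

theorem correct_position_tight : Claim_exact_correct_position := by
  intro w qi q _ hPre hD
  have hm : 0 < q.toList.length := by
    rcases Nat.eq_zero_or_pos q.toList.length with h | h
    · exact absurd (by simpa [String.toList_eq_nil_iff] using List.length_eq_zero_iff.mp h) hPre
    · exact h
  obtain ⟨-, hqi, j, hjmem, hge, hlt, htd⟩ := hD
  have hjn : j < w.toList.length := List.mem_range.mp hjmem
  set p0 : Int := (j : Int) - (w.toList.length : Int) with hp0def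
  have hp0 : p0 < 0 := by omega
  have hchk : chkS w q p0 := by
    rw [chk_wrap w q p0 hm hp0 (by omega) (by omega)]
    unfold occN
    have hj' : ((w.toList.length : Int) + p0).toNat = j := by omega
    rw [hj']
    exact ⟨by omega, htd⟩
  obtain ⟨r, hr, hA⟩ := aLoop_wrapfire w qi q p0 hchk hp0
    (max (qi + 2) ((w.toList.length : Int) - qi + 1)).toNat 0 qi qi le_rfl (by omega) (by omega) (by omega)
  have hA' : correct_position w qi q = (some r, some (r + PySem.Str.len q)) := by
    unfold correct_position
    rw [PySem.Str.len_eq]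
    exact hA
  have hKeq : PySem.Str.len w - PySem.Str.len q + 1 =
      ((w.toList.length - q.toList.length + 1 : Nat) : Int) := by
    simp only [PySem.Str.len_eq]; omega
  rcases bFold_spec w qi q (w.toList.length - q.toList.length + 1) with ⟨-, hnone⟩ | ⟨b, hsome, -⟩
  · exfalso
    refine hnone j (by omega) ?_
    rw [chk_nat w q j hm]
    exact ⟨by omega, htd⟩
  · intro hEq
    rw [hA', alt_eq, hKeq, hsome] at hEq
    have hrb : r = (b : Int) := by
      have := congrArg Prod.fst hEq
      simpa using this
    omega
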